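-- pv_equiv track=rewrite | github.com/Sarmad-dev/echoai-new | fastapi-service/app/services/enhanced_streaming_service.py | _tokenize_response
-- ===== SOURCE A (Python) =====
-- from typing import AsyncGenerator, List, Optional, Dict, Any
--
-- def _tokenize_response(text: str) -> List[str]:
--     """
--     Tokenize response text into words, punctuation, and spaces.
--
--     Args:
--         text: Text to tokenize
--
--     Returns:
--         List of tokens that preserve original spacing
--     """
--     # Simple tokenization that preserves punctuation and spaces
--     tokens = []
--     current_word = ""
--
--     for char in text:
--         if char.isalnum() or char in ["'", "-"]:
--             current_word += char
--         else:
--             if current_word: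
--                 tokens.append(current_word)
--                 current_word = ""
--             # Include all characters including spaces to preserve formatting
--             tokens.append(char)
--
--     if current_word:
--         tokens.append(current_word)
--
--     return tokens
-- ===== SOURCE B (Python) =====
-- def _tokenize_response(text: str):
--     """Run-slicing tokenizer: scan with two indices; a maximal run of
--     word characters becomes one slice token, every other character is
--     its own token."""
--     def is_word(c):
--         return c.isalnum() or c in ("'", "-")
--
--     tokens = []
--     i = 0
--     n = len(text)
--     while i < n:
--         if is_word(text[i]):
--             j = i
--             while j < n and is_word(text[j]):
--                 j += 1
--             tokens.append(text[i:j])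
--             i = j
--         else:
--             tokens.append(text[i])
--             i += 1
--     return tokens
-- ===== Notes on version B (the rewrite author's own statement) =====
-- stated objective: alternative
-- what changed: Replaces A's per-character accumulator loop (building current_word char by char and flushing it) with a two-index run-slicing scan that emits each maximal word run as one slice and each other character directly.
import Mathlib
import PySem

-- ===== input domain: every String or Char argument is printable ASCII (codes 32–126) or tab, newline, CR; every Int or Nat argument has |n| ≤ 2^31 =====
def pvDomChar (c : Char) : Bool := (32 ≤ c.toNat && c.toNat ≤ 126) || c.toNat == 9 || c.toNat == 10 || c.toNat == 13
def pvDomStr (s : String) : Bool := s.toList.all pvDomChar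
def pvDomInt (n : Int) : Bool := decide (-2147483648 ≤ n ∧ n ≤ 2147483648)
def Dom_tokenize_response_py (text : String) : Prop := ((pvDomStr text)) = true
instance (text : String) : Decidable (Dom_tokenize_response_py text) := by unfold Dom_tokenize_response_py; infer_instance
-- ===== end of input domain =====

-- B replaces A's per-character accumulator loop with a two-index run-slicing scan (alternative decomposition, same cost).


-- shared character predicate: char.isalnum() or char in ("'", "-")
def pvIsWord (c : Char) : Bool := PySem.Chars.isalnum c || c == '\'' || c == '-'

-- ===== PORT A =====
-- A's loop state: (tokens, current_word); current_word kept as List Char.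
def pvStepA (st : List String × List Char) (c : Char) : List String × List Char :=
  if pvIsWord c then (st.1, st.2 ++ [c])
  else
    let toks := if st.2 ≠ [] then st.1 ++ [String.ofList st.2] else st.1
    (toks ++ [String.ofList [c]], [])

def tokenize_response_py (text : String) : List String :=
  let st := text.toList.foldl pvStepA ([], [])
  if st.2 ≠ [] then st.1 ++ [String.ofList st.2] else st.1

-- ===== PORT B =====
-- B's run-slicing scan: a maximal word run is one token (takeWhile/dropWhile = the inner j-loop and slice), any other char its own token.
def pvAltGo : List Char → List String
  | [] => []
  | c :: rest =>
    if pvIsWord c then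
      String.ofList (c :: rest.takeWhile pvIsWord) :: pvAltGo (rest.dropWhile pvIsWord)
    else
      String.ofList [c] :: pvAltGo rest
termination_by l => l.length
decreasing_by
  · have := List.length_dropWhile_le pvIsWord rest; simp; omega
  · simp

def tokenize_response_py_alt (text : String) : List String := pvAltGo text.toList

-- ===== PRECONDITION & SPEC =====
def Spec_tokenize_response_py (text : String) (out : List String) : Prop := out = tokenize_response_py_alt text
instance (text : String) (out : List String) : Decidable (Spec_tokenize_response_py text out) := by unfold Spec_tokenize_response_py; infer_instance

-- ===== CLAIM (what is proved, stated in full; the proofs are below) =====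
def Claim_equal_tokenize_response_py : Prop := ∀ (text : String), Dom_tokenize_response_py text → Spec_tokenize_response_py text (tokenize_response_py text)

-- ===== LEMMAS AND PROOFS =====

def pvFin (st : List String × List Char) : List String :=
  if st.2 ≠ [] then st.1 ++ [String.ofList st.2] else st.1

theorem pvMain : ∀ (cs : List Char) (toks : List String) (cur : List Char),
    pvFin (cs.foldl pvStepA (toks, cur)) =
      if cur = [] then toks ++ pvAltGo cs
      else toks ++ [String.ofList (cur ++ cs.takeWhile pvIsWord)] ++ pvAltGo (cs.dropWhile pvIsWord)
  | [], toks, cur => by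
    by_cases h : cur = [] <;> simp [pvFin, pvAltGo, h]
  | c :: rest, toks, cur => by
    by_cases hw : pvIsWord c = true
    · have ih := pvMain rest toks (cur ++ [c])
      simp [List.foldl_cons, pvStepA, hw] at ih ⊢
      rw [ih]
      by_cases h : cur = [] <;> simp [h, pvAltGo, hw]
    · have hw' : pvIsWord c = false := by simpa using hw
      by_cases h : cur = []
      · have ih := pvMain rest (toks ++ [String.ofList [c]]) []
        simp [List.foldl_cons, pvStepA, hw', h] at ih ⊢
        rw [ih]
        simp [pvAltGo, hw']
      · have ih := pvMain rest (toks ++ [String.ofList cur] ++ [String.ofList [c]]) []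
        simp [List.foldl_cons, pvStepA, hw', h] at ih ⊢
        rw [ih]
        simp [pvAltGo, hw']

-- ===== VERDICT (by name: the statement is the Claim_ definition above) =====
theorem tokenize_response_py_spec : Claim_equal_tokenize_response_py := by
  intro text _
  unfold Spec_tokenize_response_py tokenize_response_py tokenize_response_py_alt
  have := pvMain text.toList [] []
  simpa [pvFin] using this
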